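-- pv_equiv track=rewrite | github.com/blobnl/Informatica_2024 | provaIntermedia/lista_alternata.py | lista_alternata
-- ===== SOURCE A (Python) =====
-- def lista_alternata(l1, l2):
--    lista = []
--    for i in range(min(len(l1), len(l2))):
--       lista = lista + [l1[i], l2[i]]
--
--    for j in range(i+1, len(l1)):
--       lista.append(l1[j])
--    for j in range(i+1, len(l2)):
--       lista.append(l2[j])
--
--    return lista
-- ===== SOURCE B (Python) =====
-- def lista_alternata(l1, l2):
--     # Ping-pong walk: one cursor pair (a,i)/(b,j); after emitting a[i] the roles swap.
--     # No min(), no zip, no staged tail passes: when the active list is exhausted the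
--     # other list's remaining suffix is the answer's tail.
--     out = []
--     a, b, i, j = l1, l2, 0, 0
--     while i < len(a):
--         out.append(a[i])
--         a, b, i, j = b, a, j, i + 1
--     out.extend(b[j:])
--     return out
-- ===== Notes on version B (the rewrite author's own statement) =====
-- stated objective: faster
-- what changed: B replaces A's staged loops (interleave by quadratic list concatenation 'lista = lista + [...]', then two tail loops) with one ping-pong loop that swaps the active/waiting cursor pair after each appended element, so the leftover suffix falls out of the same loop with no min()/zip or tail passes.
import Mathlib
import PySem

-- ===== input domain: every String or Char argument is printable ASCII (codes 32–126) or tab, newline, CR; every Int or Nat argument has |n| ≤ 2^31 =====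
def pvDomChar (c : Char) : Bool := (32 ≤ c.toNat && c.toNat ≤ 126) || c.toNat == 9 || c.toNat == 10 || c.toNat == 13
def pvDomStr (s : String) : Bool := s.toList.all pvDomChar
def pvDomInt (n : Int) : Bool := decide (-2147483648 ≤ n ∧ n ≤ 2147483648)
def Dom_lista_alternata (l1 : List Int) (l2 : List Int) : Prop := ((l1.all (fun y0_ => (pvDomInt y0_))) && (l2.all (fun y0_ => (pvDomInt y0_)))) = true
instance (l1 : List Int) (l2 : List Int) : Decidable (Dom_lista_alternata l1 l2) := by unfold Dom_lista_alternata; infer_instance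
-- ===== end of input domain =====

-- B replaces A's staged loops (quadratic 'lista = lista + [...]' interleave, then two tail loops)
-- by one ping-pong loop that swaps the two cursors after each element (objective: faster).
-- Return-value equivalence only; neither program mutates its arguments.

-- ===== PORT A =====
-- Python A; after the first loop the index variable i equals m - 1 (Pre_ guarantees the loop ran),
-- so the tail loops are range(i+1, len(l*)) with i = m - 1.
def lista_alternata (l1 : List Int) (l2 : List Int) : List Int :=
  let m : Int := min (l1.length : Int) (l2.length : Int)
  let lista : List Int := (PySem.List.pyRange 0 m 1).foldl
    (fun acc i => acc ++ [PySem.List.pyGetD l1 i 0, PySem.List.pyGetD l2 i 0]) []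
  let i : Int := m - 1
  let lista := (PySem.List.pyRange (i + 1) (l1.length : Int) 1).foldl
    (fun acc j => acc ++ [PySem.List.pyGetD l1 j 0]) lista
  let lista := (PySem.List.pyRange (i + 1) (l2.length : Int) 1).foldl
    (fun acc j => acc ++ [PySem.List.pyGetD l2 j 0]) lista
  lista

-- ===== PORT B =====
-- The Python while-loop's state is the active suffix a[i:] and the waiting suffix b[j:];
-- the port carries those suffixes directly: emit the head of the active list, then swap roles;
-- when the active list is exhausted, the waiting suffix is the tail of the answer ('out.extend(b[j:])').
def altGo (a : List Int) (b : List Int) : List Int :=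
  match a with
  | [] => b
  | x :: a' => x :: altGo b a'
termination_by a.length + b.length
decreasing_by simp; omega

def lista_alternata_alt (l1 : List Int) (l2 : List Int) : List Int :=
  altGo l1 l2

-- ===== PRECONDITION & SPEC =====
-- Pre_ excludes exactly the inputs where Python A raises UnboundLocalError: when either list is
-- empty the interleaving loop never runs and 'i' is unbound in 'range(i+1, ...)'.
def Pre_lista_alternata (l1 : List Int) (l2 : List Int) : Prop := l1 ≠ [] ∧ l2 ≠ []
instance (l1 : List Int) (l2 : List Int) : Decidable (Pre_lista_alternata l1 l2) := by
  unfold Pre_lista_alternata; infer_instance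
def pvWitness_lista_alternata : List Int × List Int := ([1, 2, 3], [10, 20])

def Spec_lista_alternata (l1 : List Int) (l2 : List Int) (out : List Int) : Prop :=
  out = lista_alternata_alt l1 l2
instance (l1 : List Int) (l2 : List Int) (out : List Int) : Decidable (Spec_lista_alternata l1 l2 out) := by
  unfold Spec_lista_alternata; infer_instance

-- ===== CLAIM (what is proved, stated in full; the proofs are below) =====
def Claim_equal_lista_alternata : Prop := ∀ (l1 : List Int) (l2 : List Int),
  Dom_lista_alternata l1 l2 → Pre_lista_alternata l1 l2 →
  Spec_lista_alternata l1 l2 (lista_alternata l1 l2)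

-- ===== LEMMAS AND PROOFS =====

-- the interleaving of the common prefix: A's indexed range loop as a flatMap over the zip
lemma zipflat (l1 l2 : List Int) :
    (List.range (min l1.length l2.length)).flatMap
      (fun k => [l1[k]?.getD 0, l2[k]?.getD 0])
    = (l1.zip l2).flatMap (fun p => [p.1, p.2]) := by
  induction l1 generalizing l2 with
  | nil => simp
  | cons a t1 ih =>
    cases l2 with
    | nil => simp
    | cons b t2 =>
      rw [show min (a :: t1).length (b :: t2).length = min t1.length t2.length + 1 by
            simp [Nat.succ_min_succ], List.range_succ_eq_map]
      simp only [List.flatMap_cons, List.flatMap_map, List.getElem?_cons_zero, List.getElem?_cons_succ,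
        Option.getD_some, List.zip_cons_cons]
      simpa using ih t2

-- B's ping-pong loop computes the interleaved prefix followed by the leftover suffixes
lemma altGo_eq (l1 l2 : List Int) :
    altGo l1 l2 = (l1.zip l2).flatMap (fun p => [p.1, p.2])
      ++ l1.drop (min l1.length l2.length) ++ l2.drop (min l1.length l2.length) := by
  induction l1 generalizing l2 with
  | nil => simp [altGo]
  | cons x xs ih =>
    cases l2 with
    | nil => simp [altGo]
    | cons y ys =>
      rw [altGo, altGo]
      simp [Nat.succ_min_succ, ih ys]

theorem lista_alternata_spec : Claim_equal_lista_alternata := by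
  intro l1 l2 _ _
  unfold Spec_lista_alternata lista_alternata lista_alternata_alt
  have hmin : min (l1.length : Int) (l2.length : Int)
      = ((min l1.length l2.length : Nat) : Int) := by
    simp [Nat.cast_min]
  simp only [hmin]
  have hm1 : ((min l1.length l2.length : Nat) : Int) - 1 + 1
      = ((min l1.length l2.length : Nat) : Int) := by ring
  rw [hm1]
  have hl1 : (l1.length : Int) = PySem.List.len l1 := rfl
  have hl2 : (l2.length : Int) = PySem.List.len l2 := rfl
  rw [hl1, hl2]
  have hnn : (0 : Int) ≤ ((min l1.length l2.length : Nat) : Int) := by positivity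
  rw [PySem.List.foldl_pyRange_pyGetD l2 0 (fun acc x => acc ++ [x]) _ hnn,
      PySem.List.foldl_pyRange_pyGetD l1 0 (fun acc x => acc ++ [x]) _ hnn]
  rw [PySem.List.foldl_append_singleton, PySem.List.foldl_append_singleton]
  rw [PySem.List.foldl_append_eq_flatMap, PySem.List.pyRange_zero_natCast]
  simp only [List.flatMap_map, PySem.List.pyGetD_natCast, Int.toNat_natCast]
  rw [altGo_eq]
  simpa [List.append_assoc] using zipflat l1 l2
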